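-- pv_equiv track=rewrite | github.com/xlypen/nopolicybot | services/storage_cutover.py | _db_not_behind
-- ===== SOURCE A (Python) =====
-- def _db_not_behind(snapshot: dict) -> tuple[bool, list[str]]:
--     json_counts = snapshot.get("json") or {}
--     db_counts = snapshot.get("db") or {}
--     checks = []
--     for key in ("users", "messages", "edges"):
--         checks.append(int(db_counts.get(key, 0) or 0) >= int(json_counts.get(key, 0) or 0))
--     reasons = []
--     if not checks[0]:
--         reasons.append("db users count is behind json")
--     if not checks[1]:
--         reasons.append("db messages count is behind json")
--     if not checks[2]:
--         reasons.append("db edges count is behind json")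
--     return all(checks), reasons
-- ===== SOURCE B (Python) =====
-- def _db_not_behind(snapshot: dict) -> tuple[bool, list[str]]:
--     json_counts = snapshot.get("json") or {}
--     db_counts = snapshot.get("db") or {}
--
--     def go(items):
--         # recursion on the table: result for the tail first, then prepend
--         if not items:
--             return True, []
--         (key, label) = items[0]
--         ok_rest, reasons_rest = go(items[1:])
--         if int(db_counts.get(key, 0) or 0) >= int(json_counts.get(key, 0) or 0):
--             return ok_rest, reasons_rest
--         return False, [label] + reasons_rest
--
--     return go([("users", "db users count is behind json"),
--                ("messages", "db messages count is behind json"),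
--                ("edges", "db edges count is behind json")])
-- ===== Notes on version B (the rewrite author's own statement) =====
-- stated objective: alternative
-- what changed: Replaced A's two staged passes (build a checks list, then three unrolled index branches appending reason strings) with a single structural recursion over a (key,label) table that computes the tail's verdict first, threads the overall boolean through the recursion, and builds the reasons list back-to-front by cons.
import Mathlib
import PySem

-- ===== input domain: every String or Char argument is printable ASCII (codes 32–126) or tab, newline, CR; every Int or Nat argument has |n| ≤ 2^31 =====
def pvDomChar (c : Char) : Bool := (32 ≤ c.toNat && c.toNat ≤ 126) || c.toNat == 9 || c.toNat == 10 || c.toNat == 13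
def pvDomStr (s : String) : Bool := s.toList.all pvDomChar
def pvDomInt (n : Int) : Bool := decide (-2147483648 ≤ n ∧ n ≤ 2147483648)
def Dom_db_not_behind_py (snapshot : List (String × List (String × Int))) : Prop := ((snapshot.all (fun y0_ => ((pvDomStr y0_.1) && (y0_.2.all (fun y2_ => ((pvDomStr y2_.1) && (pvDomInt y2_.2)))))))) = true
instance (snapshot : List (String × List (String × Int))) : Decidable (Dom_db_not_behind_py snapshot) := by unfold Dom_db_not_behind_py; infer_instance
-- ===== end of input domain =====

-- B replaces A's two staged passes (checks list + unrolled branches) with a structural recursion over a (key,label) table that builds reasons back-to-front; same cost, alternative decomposition.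


-- ===== PORT A =====
def db_not_behind_py (snapshot : List (String × List (String × Int))) : Bool × List String :=
  -- snapshot.get("json") or {}  (an empty dict is falsy)
  let json_counts : List (String × Int) :=
    match List.lookup "json" snapshot with
    | some v => if v.isEmpty then [] else v
    | none => []
  let db_counts : List (String × Int) :=
    match List.lookup "db" snapshot with
    | some v => if v.isEmpty then [] else v
    | none => []
  -- for key in ("users","messages","edges"): checks.append(int(db.get(key,0) or 0) >= int(json.get(key,0) or 0))
  -- (values are ints, so int(x or 0) = x)
  let checks : List Bool :=
    (["users", "messages", "edges"]).foldl
      (fun cs key => cs ++ [decide ((List.lookup key db_counts).getD 0 ≥ (List.lookup key json_counts).getD 0)]) []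
  let reasons : List String := []
  let reasons := if !(checks.getD 0 false) then reasons ++ ["db users count is behind json"] else reasons
  let reasons := if !(checks.getD 1 false) then reasons ++ ["db messages count is behind json"] else reasons
  let reasons := if !(checks.getD 2 false) then reasons ++ ["db edges count is behind json"] else reasons
  (checks.all id, reasons)

-- ===== PORT B =====
-- recursive helper 'go' of Source B: result for the tail first, then prepend
def pvGo (db_counts json_counts : List (String × Int)) : List (String × String) → Bool × List String
  | [] => (true, [])
  | kl :: rest =>
    let r := pvGo db_counts json_counts rest
    if (List.lookup kl.1 db_counts).getD 0 ≥ (List.lookup kl.1 json_counts).getD 0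
    then r
    else (false, kl.2 :: r.2)

def db_not_behind_py_alt (snapshot : List (String × List (String × Int))) : Bool × List String :=
  let json_counts : List (String × Int) :=
    match List.lookup "json" snapshot with
    | some v => if v.isEmpty then [] else v
    | none => []
  let db_counts : List (String × Int) :=
    match List.lookup "db" snapshot with
    | some v => if v.isEmpty then [] else v
    | none => []
  pvGo db_counts json_counts
    [("users", "db users count is behind json"),
     ("messages", "db messages count is behind json"),
     ("edges", "db edges count is behind json")]

-- ===== PRECONDITION & SPEC =====
def Spec_db_not_behind_py (snapshot : List (String × List (String × Int))) (out : Bool × List String) : Prop := out = db_not_behind_py_alt snapshot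
instance (snapshot : List (String × List (String × Int))) (out : Bool × List String) : Decidable (Spec_db_not_behind_py snapshot out) := by unfold Spec_db_not_behind_py; infer_instance

-- ===== CLAIM (what is proved, stated in full; the proofs are below) =====
def Claim_equal_db_not_behind_py : Prop := ∀ (snapshot : List (String × List (String × Int))), Dom_db_not_behind_py snapshot → Spec_db_not_behind_py snapshot (db_not_behind_py snapshot)

-- ===== LEMMAS AND PROOFS =====
-- the core identity for fixed json/db count dicts
theorem pv_core (j d : List (String × Int)) :
    (let checks : List Bool :=
      (["users", "messages", "edges"]).foldl
        (fun cs key => cs ++ [decide ((List.lookup key d).getD 0 ≥ (List.lookup key j).getD 0)]) []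
     let reasons : List String := []
     let reasons := if !(checks.getD 0 false) then reasons ++ ["db users count is behind json"] else reasons
     let reasons := if !(checks.getD 1 false) then reasons ++ ["db messages count is behind json"] else reasons
     let reasons := if !(checks.getD 2 false) then reasons ++ ["db edges count is behind json"] else reasons
     ((checks.all id, reasons) : Bool × List String)) =
    pvGo d j
      [("users", "db users count is behind json"),
       ("messages", "db messages count is behind json"),
       ("edges", "db edges count is behind json")] := by
  simp only [List.foldl_cons, List.foldl_nil, List.nil_append, List.getD, pvGo]
  by_cases h1 : (List.lookup "users" d).getD 0 ≥ (List.lookup "users" j).getD 0 <;>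
  by_cases h2 : (List.lookup "messages" d).getD 0 ≥ (List.lookup "messages" j).getD 0 <;>
  by_cases h3 : (List.lookup "edges" d).getD 0 ≥ (List.lookup "edges" j).getD 0 <;>
    simp [h1, h2, h3]

-- ===== VERDICT =====
theorem db_not_behind_py_spec : Claim_equal_db_not_behind_py := by
  intro snapshot _
  unfold Spec_db_not_behind_py db_not_behind_py db_not_behind_py_alt
  cases List.lookup "json" snapshot <;> cases List.lookup "db" snapshot <;>
    exact pv_core _ _
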